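-- pv_equiv track=rewrite | github.com/kdmartin1116-boop/sirtry | backend/sample_bills/VB-main/agents/JARVIS/jarvis_agent.py | detect_contradictions
-- ===== SOURCE A (Python) =====
-- def detect_contradictions(clauses):
--     """
--     Enhanced contradiction detection using multiple legal patterns.
--     Looks for various types of legal contradictions and inconsistencies.
--     """
--     contradictions = []
--
--     # Pattern 1: Notwithstanding + subject to (original pattern)
--     for clause in clauses:
--         if 'notwithstanding' in clause.lower() and 'subject to' in clause.lower():
--             contradictions.append({
--                 'type': 'notwithstanding_subject_to',
--                 'clause': clause,
--                 'description': 'Clause contains both "notwithstanding" and "subject to" which may create conflicting obligations'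
--             })
--
--     # Pattern 2: Shall + may in same clause (conflicting obligation levels)
--     for clause in clauses:
--         if 'shall' in clause.lower() and 'may' in clause.lower():
--             contradictions.append({
--                 'type': 'shall_may_conflict',
--                 'clause': clause,
--                 'description': 'Clause mixes mandatory ("shall") and permissive ("may") language'
--             })
--
--     # Pattern 3: Prohibited + permitted/allowed
--     for clause in clauses:
--         clause_lower = clause.lower()
--         if any(word in clause_lower for word in ['prohibited', 'forbidden', 'not permitted']) and \
--            any(word in clause_lower for word in ['permitted', 'allowed', 'authorized']):
--             contradictions.append({
--                 'type': 'prohibition_permission_conflict',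
--                 'clause': clause,
--                 'description': 'Clause contains conflicting prohibition and permission language'
--             })
--
--     # Pattern 4: Cross-clause contradictions (basic version)
--     for i, clause1 in enumerate(clauses):
--         for j, clause2 in enumerate(clauses[i+1:], i+1):
--             if detect_clause_contradiction(clause1, clause2):
--                 contradictions.append({
--                     'type': 'cross_clause_contradiction',
--                     'clause': f"Clause {i+1}: {clause1} | Clause {j+1}: {clause2}",
--                     'description': 'These clauses appear to contradict each other'
--                 })
--
--     return contradictions
--
-- def detect_clause_contradiction(clause1, clause2):
--     """
--     Detect contradictions between two clauses using keyword analysis.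
--     This is a basic implementation that could be enhanced with NLP.
--     """
--     # Convert to lowercase for comparison
--     c1_lower = clause1.lower()
--     c2_lower = clause2.lower()
--
--     # Look for opposite concepts
--     opposites = [
--         (['required', 'mandatory', 'shall', 'must'], ['optional', 'may', 'not required']),
--         (['permitted', 'allowed', 'authorized'], ['prohibited', 'forbidden', 'not allowed']),
--         (['include', 'includes'], ['exclude', 'excludes', 'does not include']),
--         (['before', 'prior to'], ['after', 'following', 'subsequent to'])
--     ]
--
--     for positive_terms, negative_terms in opposites:
--         if any(term in c1_lower for term in positive_terms) and \
--            any(term in c2_lower for term in negative_terms):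
--             return True
--         if any(term in c2_lower for term in positive_terms) and \
--            any(term in c1_lower for term in negative_terms):
--             return True
--
--     return False
-- ===== SOURCE B (Python) =====
-- # B: one fused pass computes each clause's single-clause findings and a 8-bit
-- # pos/neg category mask, and groups clause indices into a dict keyed by mask;
-- # cross-clause pairs are then emitted per clause i by scanning only the (<=256)
-- # distinct-mask buckets whose mask conflicts with clause i's mask (O(1) integer
-- # test), instead of re-scanning every other clause's text for all 23 keywords.
--
-- CATEGORIES = [
--     (['required', 'mandatory', 'shall', 'must'], ['optional', 'may', 'not required']),
--     (['permitted', 'allowed', 'authorized'], ['prohibited', 'forbidden', 'not allowed']),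
--     (['include', 'includes'], ['exclude', 'excludes', 'does not include']),
--     (['before', 'prior to'], ['after', 'following', 'subsequent to']),
-- ]
--
--
-- def _mask_of(low):
--     m = 0
--     for b, (pos, neg) in enumerate(CATEGORIES):
--         if any(t in low for t in pos):
--             m |= 1 << b
--         if any(t in low for t in neg):
--             m |= 1 << (4 + b)
--     return m
--
--
-- def _conflicts(m1, m2):
--     return (m1 & (m2 >> 4)) != 0 or (m2 & (m1 >> 4)) != 0
--
--
-- def detect_contradictions(clauses):
--     singles1 = []
--     singles2 = []
--     singles3 = []
--     ann = []        # (clause, mask) per index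
--     buckets = {}    # mask -> increasing list of clause indices
--     for k, clause in enumerate(clauses):
--         low = clause.lower()
--         if 'notwithstanding' in low and 'subject to' in low:
--             singles1.append({
--                 'type': 'notwithstanding_subject_to',
--                 'clause': clause,
--                 'description': 'Clause contains both "notwithstanding" and "subject to" which may create conflicting obligations'})
--         if 'shall' in low and 'may' in low:
--             singles2.append({
--                 'type': 'shall_may_conflict',
--                 'clause': clause,
--                 'description': 'Clause mixes mandatory ("shall") and permissive ("may") language'})
--         if any(w in low for w in ['prohibited', 'forbidden', 'not permitted']) and \
--            any(w in low for w in ['permitted', 'allowed', 'authorized']):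
--             singles3.append({
--                 'type': 'prohibition_permission_conflict',
--                 'clause': clause,
--                 'description': 'Clause contains conflicting prohibition and permission language'})
--         m = _mask_of(low)
--         ann.append((clause, m))
--         buckets.setdefault(m, []).append(k)
--
--     pairs = []
--     for i, (c1, m1) in enumerate(ann):
--         js = []
--         for m2, idxs in buckets.items():
--             if _conflicts(m1, m2):
--                 js.extend(j for j in idxs if j > i)
--         for j in sorted(js):
--             pairs.append({
--                 'type': 'cross_clause_contradiction',
--                 'clause': f"Clause {i+1}: {c1} | Clause {j+1}: {ann[j][0]}",
--                 'description': 'These clauses appear to contradict each other'})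
--     return singles1 + singles2 + singles3 + pairs
-- ===== Notes on version B (the rewrite author's own statement) =====
-- stated objective: faster
-- what changed: B replaces A's staged passes and per-pair 23-keyword text rescans by one fused pass that computes each clause's single-clause findings and an 8-bit pos/neg category bitmask while grouping clause indices into a dict keyed by mask, then emits cross-clause pairs per clause by scanning only the conflicting distinct-mask buckets (an O(1) integer test per bucket) and sorting the collected partner indices.
import Mathlib
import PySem

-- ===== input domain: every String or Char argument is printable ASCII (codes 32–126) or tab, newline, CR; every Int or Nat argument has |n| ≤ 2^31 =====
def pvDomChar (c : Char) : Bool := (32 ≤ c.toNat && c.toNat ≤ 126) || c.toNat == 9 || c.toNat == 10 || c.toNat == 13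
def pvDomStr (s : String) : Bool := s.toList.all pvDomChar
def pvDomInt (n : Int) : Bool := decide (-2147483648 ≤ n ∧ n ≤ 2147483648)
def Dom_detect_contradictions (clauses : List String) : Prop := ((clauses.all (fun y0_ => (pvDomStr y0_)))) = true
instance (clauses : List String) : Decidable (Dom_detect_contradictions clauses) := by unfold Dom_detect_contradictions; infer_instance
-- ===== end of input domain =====

-- B computes each clause's single-clause findings and an 8-bit pos/neg category mask in one
-- fused pass and groups clause indices in a dict keyed by mask; cross-clause pairs are then
-- found per clause by scanning only the distinct-mask buckets that conflict (an integer test)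
-- instead of re-scanning every other clause's text for all the keywords.


-- ===== PORT A =====
def pairOpposites : List (List String × List String) :=
  [(["required", "mandatory", "shall", "must"], ["optional", "may", "not required"]),
   (["permitted", "allowed", "authorized"], ["prohibited", "forbidden", "not allowed"]),
   (["include", "includes"], ["exclude", "excludes", "does not include"]),
   (["before", "prior to"], ["after", "following", "subsequent to"])]

def detect_clause_contradiction (clause1 clause2 : String) : Bool :=
  let c1_lower := PySem.Str.lower clause1
  let c2_lower := PySem.Str.lower clause2
  pairOpposites.any (fun pn =>
    ((pn.1.any fun t => PySem.Str.isIn t c1_lower) && (pn.2.any fun t => PySem.Str.isIn t c2_lower)) ||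
    ((pn.1.any fun t => PySem.Str.isIn t c2_lower) && (pn.2.any fun t => PySem.Str.isIn t c1_lower)))

def mkRec1 (clause : String) : List (String × String) :=
  [("type", "notwithstanding_subject_to"), ("clause", clause),
   ("description", "Clause contains both \"notwithstanding\" and \"subject to\" which may create conflicting obligations")]

def mkRec2 (clause : String) : List (String × String) :=
  [("type", "shall_may_conflict"), ("clause", clause),
   ("description", "Clause mixes mandatory (\"shall\") and permissive (\"may\") language")]

def mkRec3 (clause : String) : List (String × String) :=
  [("type", "prohibition_permission_conflict"), ("clause", clause),
   ("description", "Clause contains conflicting prohibition and permission language")]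

def mkRec4 (i : Int) (clause1 : String) (j : Int) (clause2 : String) : List (String × String) :=
  [("type", "cross_clause_contradiction"),
   ("clause", "Clause " ++ PySem.Int.toStr (i + 1) ++ ": " ++ clause1 ++ " | Clause " ++ PySem.Int.toStr (j + 1) ++ ": " ++ clause2),
   ("description", "These clauses appear to contradict each other")]

def detect_contradictions (clauses : List String) : List (List (String × String)) :=
  let contradictions : List (List (String × String)) := []
  -- Pattern 1
  let contradictions := clauses.foldl (fun acc clause =>
    if PySem.Str.isIn "notwithstanding" (PySem.Str.lower clause) &&
       PySem.Str.isIn "subject to" (PySem.Str.lower clause) then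
      acc ++ [mkRec1 clause] else acc) contradictions
  -- Pattern 2
  let contradictions := clauses.foldl (fun acc clause =>
    if PySem.Str.isIn "shall" (PySem.Str.lower clause) &&
       PySem.Str.isIn "may" (PySem.Str.lower clause) then
      acc ++ [mkRec2 clause] else acc) contradictions
  -- Pattern 3
  let contradictions := clauses.foldl (fun acc clause =>
    let clause_lower := PySem.Str.lower clause
    if (["prohibited", "forbidden", "not permitted"].any fun w => PySem.Str.isIn w clause_lower) &&
       (["permitted", "allowed", "authorized"].any fun w => PySem.Str.isIn w clause_lower) then
      acc ++ [mkRec3 clause] else acc) contradictions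
  -- Pattern 4 (cross-clause)
  let contradictions := (PySem.List.enumerate clauses 0).foldl (fun acc ic =>
    (PySem.List.enumerate (PySem.List.slice clauses (some (ic.1 + 1)) none) (ic.1 + 1)).foldl
      (fun acc jc =>
        if detect_clause_contradiction ic.2 jc.2 then acc ++ [mkRec4 ic.1 ic.2 jc.1 jc.2] else acc)
      acc) contradictions
  contradictions

-- ===== PORT B =====
def categoriesB : List (List String × List String) :=
  [(["required", "mandatory", "shall", "must"], ["optional", "may", "not required"]),
   (["permitted", "allowed", "authorized"], ["prohibited", "forbidden", "not allowed"]),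
   (["include", "includes"], ["exclude", "excludes", "does not include"]),
   (["before", "prior to"], ["after", "following", "subsequent to"])]

-- _mask_of(low): one bit per category hit, positives in bits 0-3, negatives in bits 4-7
def maskOf (low : String) : Nat :=
  (PySem.List.enumerate categoriesB 0).foldl (fun m bpn =>
    let m := if bpn.2.1.any (fun t => PySem.Str.isIn t low) then m ||| (1 <<< bpn.1.toNat) else m
    let m := if bpn.2.2.any (fun t => PySem.Str.isIn t low) then m ||| (1 <<< (4 + bpn.1.toNat)) else m
    m) 0

def conflictsB (m1 m2 : Nat) : Bool := (m1 &&& (m2 >>> 4)) != 0 || (m2 &&& (m1 >>> 4)) != 0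

-- the fused first pass: (singles1, singles2, singles3, ann, buckets)
def passState : Type :=
  List (List (String × String)) × List (List (String × String)) × List (List (String × String)) ×
  List (String × Nat) × PySem.Dict Nat (List Int)

def passStep (st : passState) (kc : Int × String) : passState :=
  let low := PySem.Str.lower kc.2
  let s1 := if PySem.Str.isIn "notwithstanding" low && PySem.Str.isIn "subject to" low then
      st.1 ++ [mkRec1 kc.2] else st.1
  let s2 := if PySem.Str.isIn "shall" low && PySem.Str.isIn "may" low then
      st.2.1 ++ [mkRec2 kc.2] else st.2.1
  let s3 := if (["prohibited", "forbidden", "not permitted"].any fun w => PySem.Str.isIn w low) &&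
       (["permitted", "allowed", "authorized"].any fun w => PySem.Str.isIn w low) then
      st.2.2.1 ++ [mkRec3 kc.2] else st.2.2.1
  let m := maskOf low
  let ann := st.2.2.2.1 ++ [(kc.2, m)]
  let buckets := st.2.2.2.2.modify m [] (· ++ [kc.1])
  (s1, s2, s3, ann, buckets)

def detect_contradictions_alt (clauses : List String) : List (List (String × String)) :=
  let st := (PySem.List.enumerate clauses 0).foldl passStep
    (([], [], [], [], PySem.Dict.empty) : passState)
  let ann := st.2.2.2.1
  let buckets := st.2.2.2.2
  let pairs := (PySem.List.enumerate ann 0).foldl (fun pairs icm =>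
    let js := buckets.items.foldl (fun js mv =>
      if conflictsB icm.2.2 mv.1 then js ++ mv.2.filter (fun j => decide (icm.1 < j)) else js)
      ([] : List Int)
    (PySem.List.sorted js (fun x => x) false).foldl (fun pairs j =>
      -- ann[j]: j is an index produced by the first pass, always in range
      pairs ++ [mkRec4 icm.1 icm.2.1 j ((PySem.List.pyGet? ann j).getD ("", 0)).1]) pairs)
    ([] : List (List (String × String)))
  st.1 ++ st.2.1 ++ st.2.2.1 ++ pairs

-- ===== PRECONDITION & SPEC =====
def Spec_detect_contradictions (clauses : List String) (out : List (List (String × String))) : Prop := out = detect_contradictions_alt clauses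
instance (clauses : List String) (out : List (List (String × String))) : Decidable (Spec_detect_contradictions clauses out) := by unfold Spec_detect_contradictions; infer_instance

-- ===== CLAIM (what is proved, stated in full; the proofs are below) =====
def Claim_equal_detect_contradictions : Prop := ∀ (clauses : List String), Dom_detect_contradictions clauses → Spec_detect_contradictions clauses (detect_contradictions clauses)

-- ===== LEMMAS AND PROOFS =====

-- predicates of the three single-clause patterns (as both programs test them)
def p1B (c : String) : Bool :=
  PySem.Str.isIn "notwithstanding" (PySem.Str.lower c) && PySem.Str.isIn "subject to" (PySem.Str.lower c)
def p2B (c : String) : Bool :=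
  PySem.Str.isIn "shall" (PySem.Str.lower c) && PySem.Str.isIn "may" (PySem.Str.lower c)
def p3B (c : String) : Bool :=
  (["prohibited", "forbidden", "not permitted"].any fun w => PySem.Str.isIn w (PySem.Str.lower c)) &&
  (["permitted", "allowed", "authorized"].any fun w => PySem.Str.isIn w (PySem.Str.lower c))

-- closed forms of B's first pass
def annF (clauses : List String) : List (String × Nat) :=
  clauses.map (fun c => (c, maskOf (PySem.Str.lower c)))
def psF (clauses : List String) : List (Nat × Int) :=
  (PySem.List.enumerate clauses 0).map (fun kc => (maskOf (PySem.Str.lower kc.2), kc.1))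

-- the canonical common value both programs compute
def innerC (clauses : List String) (ic : Int × String) : List (List (String × String)) :=
  ((PySem.List.enumerate clauses 0).filter (fun kc =>
      conflictsB (maskOf (PySem.Str.lower ic.2)) (maskOf (PySem.Str.lower kc.2)) && decide (ic.1 < kc.1))).map
    (fun kc => mkRec4 ic.1 ic.2 kc.1 kc.2)
def canonical (clauses : List String) : List (List (String × String)) :=
  (clauses.filter p1B).map mkRec1 ++ (clauses.filter p2B).map mkRec2 ++ (clauses.filter p3B).map mkRec3 ++
  (PySem.List.enumerate clauses 0).flatMap (innerC clauses)

-- maskOf written out over the four category literals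
def enc (p0 n0 p1 n1 p2 n2 p3 n3 : Bool) : Nat :=
  let m : Nat := 0
  let m := if p0 then m ||| (1 <<< 0) else m
  let m := if n0 then m ||| (1 <<< (4 + 0)) else m
  let m := if p1 then m ||| (1 <<< 1) else m
  let m := if n1 then m ||| (1 <<< (4 + 1)) else m
  let m := if p2 then m ||| (1 <<< 2) else m
  let m := if n2 then m ||| (1 <<< (4 + 2)) else m
  let m := if p3 then m ||| (1 <<< 3) else m
  let m := if n3 then m ||| (1 <<< (4 + 3)) else m
  m

theorem maskOf_eq (low : String) : maskOf low =
    enc (["required", "mandatory", "shall", "must"].any fun t => PySem.Str.isIn t low)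
        (["optional", "may", "not required"].any fun t => PySem.Str.isIn t low)
        (["permitted", "allowed", "authorized"].any fun t => PySem.Str.isIn t low)
        (["prohibited", "forbidden", "not allowed"].any fun t => PySem.Str.isIn t low)
        (["include", "includes"].any fun t => PySem.Str.isIn t low)
        (["exclude", "excludes", "does not include"].any fun t => PySem.Str.isIn t low)
        (["before", "prior to"].any fun t => PySem.Str.isIn t low)
        (["after", "following", "subsequent to"].any fun t => PySem.Str.isIn t low) := rfl

set_option maxHeartbeats 4000000 in
theorem enc_conflicts : ∀ (p0 n0 p1 n1 p2 n2 p3 n3 q0 r0 q1 r1 q2 r2 q3 r3 : Bool),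
    conflictsB (enc p0 n0 p1 n1 p2 n2 p3 n3) (enc q0 r0 q1 r1 q2 r2 q3 r3) =
      ((p0 && r0 || (q0 && n0)) ||
       ((p1 && r1 || (q1 && n1)) ||
        ((p2 && r2 || (q2 && n2)) ||
         ((p3 && r3 || (q3 && n3)) || false)))) := by decide -- ENCMARK

theorem detect_eq_conflicts (c1 c2 : String) :
    detect_clause_contradiction c1 c2 =
      conflictsB (maskOf (PySem.Str.lower c1)) (maskOf (PySem.Str.lower c2)) := by
  rw [maskOf_eq, maskOf_eq, enc_conflicts]; rfl

-- the fused pass is five independent accumulations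
theorem pass_split (l : List (Int × String)) (a b c d : _) (e : PySem.Dict Nat (List Int)) :
    l.foldl passStep (a, b, c, d, e) =
      (l.foldl (fun s kc => if p1B kc.2 then s ++ [mkRec1 kc.2] else s) a,
       l.foldl (fun s kc => if p2B kc.2 then s ++ [mkRec2 kc.2] else s) b,
       l.foldl (fun s kc => if p3B kc.2 then s ++ [mkRec3 kc.2] else s) c,
       l.foldl (fun s kc => s ++ [(kc.2, maskOf (PySem.Str.lower kc.2))]) d,
       l.foldl (fun dd kc => dd.modify (maskOf (PySem.Str.lower kc.2)) [] (fun v => v ++ [kc.1])) e) := by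
  induction l generalizing a b c d e with
  | nil => rfl
  | cons kc l ih =>
    rw [List.foldl_cons]
    simp only [passStep]
    rw [ih]
    simp only [List.foldl_cons, p1B, p2B, p3B]
    rfl

theorem foldl_enum_snd {alpha beta : Type} (l : List alpha) (s : Int) (g : beta → alpha → beta) (a : beta) :
    (PySem.List.enumerate l s).foldl (fun x kc => g x kc.2) a = l.foldl g a := by
  conv_rhs => rw [← PySem.List.map_snd_enumerate l s, List.foldl_map]

theorem enumerate_map {alpha beta : Type} (g : alpha → beta) (l : List alpha) (s : Int) :
    PySem.List.enumerate (l.map g) s = (PySem.List.enumerate l s).map (fun p => (p.1, g p.2)) := by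
  induction l generalizing s with
  | nil => simp [PySem.List.enumerate]
  | cons a l ih => simp [PySem.List.enumerate_cons, ih]

theorem flatMap_congr_mem {alpha beta : Type} (l : List alpha) (f g : alpha → List beta)
    (h : ∀ a ∈ l, f a = g a) : l.flatMap f = l.flatMap g := by
  simp only [List.flatMap_def]; rw [List.map_congr_left h]

theorem foldl_if_append {alpha beta : Type} (l : List alpha) (c : alpha → Bool) (g : alpha → List beta)
    (a : List beta) :
    l.foldl (fun js mv => if c mv then js ++ g mv else js) a = a ++ l.flatMap (fun mv => if c mv then g mv else []) := by
  rw [← PySem.List.foldl_append_eq_flatMap]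
  apply PySem.List.foldl_congr_mem
  intro acc x _
  split <;> simp

theorem flat_filter_perm {kappa alpha : Type} [DecidableEq kappa] (K : List kappa) (qs : List (kappa × alpha))
    (hK : K.Nodup) (hsub : ∀ p ∈ qs, p.1 ∈ K) :
    (K.flatMap (fun m => qs.filter (fun p => p.1 == m))).Perm qs := by
  induction K generalizing qs with
  | nil =>
    have hqs : qs = [] := by
      cases qs with
      | nil => rfl
      | cons p qs => exact absurd (hsub p (by simp)) (by simp)
    simp [hqs]
  | cons m K ih =>
    simp only [List.flatMap_cons]
    have hrw : K.flatMap (fun m' => qs.filter (fun p => p.1 == m')) =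
        K.flatMap (fun m' => (qs.filter (fun p => !(p.1 == m))).filter (fun p => p.1 == m')) := by
      apply flatMap_congr_mem
      intro m' hm'
      rw [List.filter_filter]
      apply List.filter_congr
      intro p _
      have hne : m' ≠ m := by rintro rfl; exact (List.nodup_cons.1 hK).1 hm'
      by_cases h : p.1 = m' <;> simp [h, hne]
    rw [hrw]
    have hperm := ih (qs.filter (fun p => !(p.1 == m))) (List.nodup_cons.1 hK).2 (by
      intro p hp
      have hmem := List.mem_of_mem_filter hp
      have hcond := List.of_mem_filter hp
      have := hsub p hmem
      simp only [List.mem_cons] at this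
      rcases this with h | h
      · simp only [h] at hcond; simp at hcond
      · exact h)
    exact (hperm.append_left _).trans (List.filter_append_perm _ qs)

-- buckets: keys and per-key contents
theorem buckets_getD (clauses : List String) (m : Nat) :
    ((psF clauses).foldl (fun dd p => dd.modify p.1 [] (fun v => v ++ [p.2])) PySem.Dict.empty).getD m [] =
      ((psF clauses).filter (fun p => p.1 == m)).map (·.2) := by
  rw [PySem.Dict.getD_foldl_modify_append]; simp

theorem buckets_keys (clauses : List String) :
    ((psF clauses).foldl (fun dd p => dd.modify p.1 [] (fun v => v ++ [p.2])) PySem.Dict.empty).keys =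
      PySem.Set.ofList ((psF clauses).map (·.1)) := by
  rw [PySem.Dict.keys_foldl_modify_key]
  simp [PySem.Set.update, PySem.Set.ofList]

theorem buckets_keys_nodup (clauses : List String) :
    ((psF clauses).foldl (fun dd p => dd.modify p.1 [] (fun v => v ++ [p.2])) PySem.Dict.empty).keys.Nodup := by
  apply PySem.Dict.nodup_keys_foldl_modify_key
  simp

-- index bounds of enumerate, and the drop/filter characterisation of the tail
theorem enum_fst_bounds {alpha : Type} (l : List alpha) (s : Int) :
    ∀ p ∈ PySem.List.enumerate l s, s ≤ p.1 ∧ p.1 < s + l.length := by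
  intro p hp
  rcases (PySem.List.mem_enumerate_iff _ _ _).1 hp with ⟨k, hk, rfl⟩
  refine ⟨by simp, by simp; omega⟩

theorem enum_filter_split {alpha : Type} (l : List alpha) (k : Nat) (F : (Int × alpha) → Bool) :
    (PySem.List.enumerate l 0).filter (fun kc => F kc && decide ((k : Int) < kc.1)) =
      (PySem.List.enumerate (l.drop (k + 1)) ((k : Int) + 1)).filter F := by
  by_cases hlen : k + 1 ≤ l.length
  · conv_lhs => rw [← List.take_append_drop (k + 1) l, PySem.List.enumerate_append, List.filter_append]
    have htl : (l.take (k + 1)).length = k + 1 := by rw [List.length_take]; omega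
    have h1 : (PySem.List.enumerate (l.take (k + 1)) 0).filter
        (fun kc => F kc && decide ((k : Int) < kc.1)) = [] := by
      rw [List.filter_eq_nil_iff]
      intro p hp
      have hb := enum_fst_bounds _ _ p hp
      rw [htl] at hb
      simp only [Bool.and_eq_true, decide_eq_true_eq, not_and]
      intro _
      omega
    rw [h1, List.nil_append, htl]
    have hst : (0 : Int) + ((k + 1 : Nat) : Int) = (k : Int) + 1 := by push_cast; ring
    rw [hst]
    apply List.filter_congr
    intro p hp
    have hb := enum_fst_bounds _ _ p hp
    have : decide ((k : Int) < p.1) = true := by simp; omega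
    rw [this, Bool.and_true]
  · have hd : l.drop (k + 1) = [] := by rw [List.drop_eq_nil_iff]; omega
    rw [hd]
    simp only [PySem.List.enumerate_nil, List.filter_nil]
    rw [List.filter_eq_nil_iff]
    intro p hp
    have hb := enum_fst_bounds _ _ p hp
    simp only [Bool.and_eq_true, decide_eq_true_eq, not_and]
    intro _
    omega

theorem lookup_annF (clauses : List String) (kc : Int × String) (h : kc ∈ PySem.List.enumerate clauses 0) :
    ((PySem.List.pyGet? (annF clauses) kc.1).getD ("", 0)).1 = kc.2 := by
  rcases (PySem.List.mem_enumerate_iff _ _ _).1 h with ⟨k, hk, rfl⟩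
  simp [annF, hk]

-- A computes the canonical value
theorem A_listA (clauses : List String) (acc : List (List (String × String))) (ic : Int × String)
    (hic : ic ∈ PySem.List.enumerate clauses 0) :
    (PySem.List.enumerate (PySem.List.slice clauses (some (ic.1 + 1)) none) (ic.1 + 1)).foldl
      (fun acc jc =>
        if detect_clause_contradiction ic.2 jc.2 then acc ++ [mkRec4 ic.1 ic.2 jc.1 jc.2] else acc)
      acc = acc ++ innerC clauses ic := by
  rw [PySem.List.foldl_append_if]
  congr 1
  rcases (PySem.List.mem_enumerate_iff _ _ _).1 hic with ⟨k, hk, rfl⟩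
  simp only [zero_add, innerC]
  rw [show ((k : Int) + 1) = ((k + 1 : Nat) : Int) from by push_cast; ring,
      PySem.List.slice_from_natCast]
  push_cast
  rw [List.filter_congr (fun jc _ => detect_eq_conflicts (clauses[k]) jc.2)]
  rw [← enum_filter_split clauses k
      (fun jc => conflictsB (maskOf (PySem.Str.lower clauses[k])) (maskOf (PySem.Str.lower jc.2)))]

theorem A_canonical (clauses : List String) : detect_contradictions clauses = canonical clauses := by
  simp only [detect_contradictions]
  rw [PySem.List.foldl_append_if, PySem.List.foldl_append_if, PySem.List.foldl_append_if]
  calc (PySem.List.enumerate clauses 0).foldl _ _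
      = (PySem.List.enumerate clauses 0).foldl (fun acc ic => acc ++ innerC clauses ic)
          ([] ++ (clauses.filter p1B).map mkRec1 ++ (clauses.filter p2B).map mkRec2 ++
            (clauses.filter p3B).map mkRec3) :=
        PySem.List.foldl_congr_mem _ _ _ _ (fun acc ic hic => A_listA clauses acc ic hic)
    _ = canonical clauses := by
        rw [PySem.List.foldl_append_eq_flatMap]
        simp only [canonical, List.nil_append, List.append_assoc]

-- the per-clause pair emission of B, in closed form
theorem B_inner (clauses : List String) (pairs : List (List (String × String))) (i : Int) (c : String) :
    (PySem.List.sorted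
        (((psF clauses).foldl (fun dd p => dd.modify p.1 [] (fun v => v ++ [p.2]))
            PySem.Dict.empty).items.foldl
          (fun js mv => if conflictsB (maskOf (PySem.Str.lower c)) mv.1 then
              js ++ mv.2.filter (fun j => decide (i < j)) else js) [])
        (fun x => x) false).foldl
      (fun pairs j => pairs ++ [mkRec4 i c j ((PySem.List.pyGet? (annF clauses) j).getD ("", 0)).1])
      pairs = pairs ++ innerC clauses (i, c) := by
  have hnd := buckets_keys_nodup clauses
  set m1 := maskOf (PySem.Str.lower c) with hm1
  set bkts := (psF clauses).foldl (fun dd p => dd.modify p.1 [] (fun v => v ++ [p.2]))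
      PySem.Dict.empty with hbkts
  set qs := (psF clauses).filter (fun p => conflictsB m1 p.1 && decide (i < p.2)) with hqs
  set Tc := ((PySem.List.enumerate clauses 0).filter (fun kc =>
      conflictsB m1 (maskOf (PySem.Str.lower kc.2)) && decide (i < kc.1))).map (fun kc => kc.1)
    with hTc
  -- 1. the js accumulation is a flatMap over the bucket items
  rw [foldl_if_append]
  rw [PySem.Dict.items_eq_map_keys bkts hnd []]
  simp only [List.nil_append]
  rw [List.flatMap_map]
  have hS1 : ∀ m, (if conflictsB m1 (m, bkts.getD m []).1 = true then
        List.filter (fun j => decide (i < j)) (m, bkts.getD m []).2 else [])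
      = (qs.filter (fun p => p.1 == m)).map (fun p => p.2) := by
    intro m
    simp only []
    rw [hbkts, buckets_getD]
    by_cases hc : conflictsB m1 m
    · rw [if_pos hc]
      rw [List.filter_map, List.filter_filter, hqs, List.filter_filter]
      congr 1
      apply List.filter_congr
      intro p _
      by_cases h1 : p.1 = m
      · have hb : (p.1 == m) = true := by simp [h1]
        rw [hb]
        simp [h1, hc]
      · have hb : (p.1 == m) = false := by simp [h1]
        rw [hb]
        simp
    · rw [if_neg hc]
      symm
      rw [List.map_eq_nil_iff, List.filter_eq_nil_iff]
      intro p hp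
      have hcond := List.of_mem_filter (by exact hp : p ∈ qs)
      simp only [Bool.and_eq_true, decide_eq_true_eq] at hcond
      intro hpm
      rw [beq_iff_eq] at hpm
      rw [hpm] at hcond
      exact hc hcond.1
  rw [flatMap_congr_mem _ _ _ (fun m _ => hS1 m)]
  have hjs : bkts.keys.flatMap (fun m => (qs.filter (fun p => p.1 == m)).map (fun p => p.2))
      = (bkts.keys.flatMap (fun m => qs.filter (fun p => p.1 == m))).map (fun p => p.2) :=
    List.map_flatMap.symm
  rw [hjs]
  have hperm : (bkts.keys.flatMap (fun m => qs.filter (fun p => p.1 == m))).Perm qs := by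
    apply flat_filter_perm _ _ hnd
    intro p hp
    rw [hbkts, buckets_keys]
    exact (PySem.Set.mem_ofList _ _).2 (List.mem_map_of_mem (List.mem_of_mem_filter hp))
  have hqsTc : qs.map (fun p => p.2) = Tc := by
    rw [hqs, hTc, psF, List.filter_map, List.map_map]
    rfl
  have hpw : Tc.Pairwise (fun a b => a < b) := by
    rw [hTc, List.pairwise_map]
    exact List.Pairwise.filter _ (PySem.List.pairwise_lt_enumerate _ _)
  have hsorted : PySem.List.sorted
      ((bkts.keys.flatMap (fun m => qs.filter (fun p => p.1 == m))).map (fun p => p.2))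
      (fun x => x) false = Tc := by
    apply PySem.List.sorted_eq_of_perm_of_pairwise_lt
    · rw [← hqsTc]
      exact (hperm.map (fun p => p.2)).symm
    · exact hpw
  rw [hsorted, PySem.List.foldl_append_singleton_eq_map]
  congr 1
  rw [hTc, List.map_map, innerC]
  apply List.map_congr_left
  intro kc hkc
  have : ((PySem.List.pyGet? (annF clauses) kc.1).getD ("", 0)).1 = kc.2 :=
    lookup_annF clauses kc (List.mem_of_mem_filter hkc)
  simp [Function.comp, this]

-- B computes the canonical value
theorem B_canonical (clauses : List String) : detect_contradictions_alt clauses = canonical clauses := by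
  simp only [detect_contradictions_alt, pass_split]
  have hs1 : List.foldl (fun s kc => if p1B kc.2 = true then s ++ [mkRec1 kc.2] else s) []
      (PySem.List.enumerate clauses 0) = (clauses.filter p1B).map mkRec1 := by
    rw [foldl_enum_snd clauses 0 (fun s c => if p1B c then s ++ [mkRec1 c] else s) [],
        PySem.List.foldl_append_if, List.nil_append]
  have hs2 : List.foldl (fun s kc => if p2B kc.2 = true then s ++ [mkRec2 kc.2] else s) []
      (PySem.List.enumerate clauses 0) = (clauses.filter p2B).map mkRec2 := by
    rw [foldl_enum_snd clauses 0 (fun s c => if p2B c then s ++ [mkRec2 c] else s) [],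
        PySem.List.foldl_append_if, List.nil_append]
  have hs3 : List.foldl (fun s kc => if p3B kc.2 = true then s ++ [mkRec3 kc.2] else s) []
      (PySem.List.enumerate clauses 0) = (clauses.filter p3B).map mkRec3 := by
    rw [foldl_enum_snd clauses 0 (fun s c => if p3B c then s ++ [mkRec3 c] else s) [],
        PySem.List.foldl_append_if, List.nil_append]
  have hann : List.foldl (fun s kc => s ++ [(kc.2, maskOf (PySem.Str.lower kc.2))]) []
      (PySem.List.enumerate clauses 0) = annF clauses := by
    rw [foldl_enum_snd clauses 0 (fun s c => s ++ [(c, maskOf (PySem.Str.lower c))]) [],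
        PySem.List.foldl_append_singleton_eq_map, List.nil_append, annF]
  have hbk : List.foldl (fun dd kc => dd.modify (maskOf (PySem.Str.lower kc.2)) [] fun v => v ++ [kc.1])
      PySem.Dict.empty (PySem.List.enumerate clauses 0) =
      (psF clauses).foldl (fun dd p => dd.modify p.1 [] fun v => v ++ [p.2]) PySem.Dict.empty := by
    rw [psF, List.foldl_map]
  rw [hs1, hs2, hs3, hann, hbk]
  rw [show PySem.List.enumerate (annF clauses) 0 =
      (PySem.List.enumerate clauses 0).map (fun p => (p.1, (p.2, maskOf (PySem.Str.lower p.2))))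
    from by rw [annF, enumerate_map], List.foldl_map]
  simp only []
  rw [PySem.List.foldl_congr_mem _ _ (fun pairs kc => pairs ++ innerC clauses kc) _
        (fun pairs kc _ => B_inner clauses pairs kc.1 kc.2),
      PySem.List.foldl_append_eq_flatMap, List.nil_append, canonical]

theorem detect_contradictions_eq (clauses : List String) :
    detect_contradictions clauses = detect_contradictions_alt clauses := by
  rw [A_canonical, B_canonical]

-- ===== VERDICT (by name: the statement is the Claim_ definition above) =====
theorem detect_contradictions_spec : Claim_equal_detect_contradictions := by
  intro clauses _
  exact detect_contradictions_eq clauses
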